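-- pv_equiv track=rewrite | github.com/stvsever/COMPASS-Engine | frontend/compass_ui.py | _choose_context_length
-- ===== SOURCE A (Python) =====
-- from typing import List, Dict, Any, Optional, Callable
--
-- def _choose_context_length(candidates: List[int]) -> Optional[int]:
--     # Use a conservative, practical window: ignore tiny/sentinel values.
--     sane = [v for v in candidates if 64 <= v <= 1_000_000]
--     if sane:
--         return min(sane)
--     fallback = [v for v in candidates if 2 <= v <= 1_000_000]
--     if fallback:
--         return min(fallback)
--     return None
-- ===== SOURCE B (Python) =====
-- from typing import List, Optional
--
-- def _choose_context_length(candidates: List[int]) -> Optional[int]: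
--     min_sane = None
--     min_fallback = None
--     for v in candidates:
--         if 2 <= v <= 1_000_000:
--             if min_fallback is None or v < min_fallback:
--                 min_fallback = v
--             if 64 <= v and (min_sane is None or v < min_sane):
--                 min_sane = v
--     return min_sane if min_sane is not None else min_fallback
-- ===== Notes on version B (the rewrite author's own statement) =====
-- stated objective: alternative
-- what changed: Replaced the two filter-list materialisations plus min() calls with a single pass over candidates maintaining two running Optional minima (sane and fallback).
import Mathlib
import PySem

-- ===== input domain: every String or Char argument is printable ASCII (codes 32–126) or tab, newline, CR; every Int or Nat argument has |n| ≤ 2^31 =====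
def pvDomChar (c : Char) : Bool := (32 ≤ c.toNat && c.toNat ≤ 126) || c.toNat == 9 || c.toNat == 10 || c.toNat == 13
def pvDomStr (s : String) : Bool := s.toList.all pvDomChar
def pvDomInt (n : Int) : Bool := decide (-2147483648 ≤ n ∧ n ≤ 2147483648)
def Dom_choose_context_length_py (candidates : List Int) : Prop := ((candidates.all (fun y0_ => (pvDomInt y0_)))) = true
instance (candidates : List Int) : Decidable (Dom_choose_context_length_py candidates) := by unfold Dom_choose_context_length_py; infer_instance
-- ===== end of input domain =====

-- B replaces A's two filter-then-min passes with one loop keeping two running optional minima; alternative decomposition, return value only.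


-- ===== PORT A =====
def choose_context_length_py (candidates : List Int) : Option Int :=
  let sane := candidates.filter (fun v => decide (64 ≤ v ∧ v ≤ 1000000))
  if sane ≠ [] then PySem.List.min? sane (fun x => x)
  else
    let fallback := candidates.filter (fun v => decide (2 ≤ v ∧ v ≤ 1000000))
    if fallback ≠ [] then PySem.List.min? fallback (fun x => x)
    else none

-- ===== PORT B =====
-- one loop step of Source B: update the (min_sane, min_fallback) accumulators for v
def cclAltStep (s : Option Int × Option Int) (v : Int) : Option Int × Option Int :=
  if 2 ≤ v ∧ v ≤ 1000000 then
    let mf := match s.2 with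
      | none => some v
      | some m => if v < m then some v else some m
    let ms := if 64 ≤ v then
        match s.1 with
        | none => some v
        | some m => if v < m then some v else some m
      else s.1
    (ms, mf)
  else s

def choose_context_length_py_alt (candidates : List Int) : Option Int :=
  let r := candidates.foldl cclAltStep (none, none)
  match r.1 with
  | some m => some m
  | none => r.2

-- ===== PRECONDITION & SPEC =====
def Spec_choose_context_length_py (candidates : List Int) (out : Option Int) : Prop := out = choose_context_length_py_alt candidates
instance (candidates : List Int) (out : Option Int) : Decidable (Spec_choose_context_length_py candidates out) := by unfold Spec_choose_context_length_py; infer_instance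

-- ===== CLAIM (what is proved, stated in full; the proofs are below) =====
def Claim_equal_choose_context_length_py : Prop := ∀ (candidates : List Int), Dom_choose_context_length_py candidates → Spec_choose_context_length_py candidates (choose_context_length_py candidates)

-- ===== LEMMAS AND PROOFS =====

-- running optional minimum over a list
def omin (o : Option Int) (l : List Int) : Option Int :=
  l.foldl (fun a v => match a with
    | none => some v
    | some m => if v < m then some v else some m) o

theorem omin_some (a : Int) (l : List Int) : omin (some a) l = some (l.foldl min a) := by
  induction l generalizing a with
  | nil => rfl
  | cons x t ih =>
    simp only [omin, List.foldl] at *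
    by_cases h : x < a
    · simp [h, le_of_lt h, ih]
    · have : min a x = a := by omega
      simp [h, this, ih]

theorem omin_nil_eq_min? (l : List Int) :
    omin none l = PySem.List.min? l (fun x => x) := by
  cases l with
  | nil => rfl
  | cons x t =>
    rw [PySem.List.min?_id_cons]
    simpa [omin, List.foldl] using omin_some x t

-- the fold of Source B computes the running minima of the two filtered lists
theorem fold_step (l : List Int) (ms mf : Option Int) :
    l.foldl cclAltStep (ms, mf) =
      (omin ms (l.filter (fun v => decide (64 ≤ v ∧ v ≤ 1000000))),
       omin mf (l.filter (fun v => decide (2 ≤ v ∧ v ≤ 1000000)))) := by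
  induction l generalizing ms mf with
  | nil => rfl
  | cons x t ih =>
    simp only [List.foldl, List.filter]
    by_cases h2 : 2 ≤ x ∧ x ≤ 1000000
    · by_cases h64 : 64 ≤ x
      · have h64' : 64 ≤ x ∧ x ≤ 1000000 := ⟨h64, h2.2⟩
        simp only [cclAltStep, h2, if_pos, h64]
        rw [ih]
        cases ms <;> cases mf <;> simp [omin]
      · have h64' : ¬ (64 ≤ x ∧ x ≤ 1000000) := fun h => h64 h.1
        simp only [cclAltStep, h2, h64, if_neg, not_false_eq_true]
        rw [ih]
        cases mf <;> simp [omin]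
    · have h64' : ¬ (64 ≤ x ∧ x ≤ 1000000) := fun h => h2 ⟨by omega, h.2⟩
      simp [cclAltStep, h2, h64', ih]

theorem omin_none_eq_none_iff (l : List Int) : omin none l = none ↔ l = [] := by
  rw [omin_nil_eq_min?]
  exact PySem.List.min?_eq_none_iff (xs := l) (key := fun x => x)

-- ===== VERDICT (by name: the statement is the Claim_ definition above) =====
theorem choose_context_length_py_spec : Claim_equal_choose_context_length_py := by
  intro candidates _
  unfold Spec_choose_context_length_py choose_context_length_py choose_context_length_py_alt
  rw [fold_step]
  simp only
  by_cases hs : candidates.filter (fun v => decide (64 ≤ v ∧ v ≤ 1000000)) = []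
  · rw [if_neg (fun h => h hs)]
    have : omin none (candidates.filter (fun v => decide (64 ≤ v ∧ v ≤ 1000000))) = none :=
      (omin_none_eq_none_iff _).mpr hs
    rw [this]
    by_cases hf : candidates.filter (fun v => decide (2 ≤ v ∧ v ≤ 1000000)) = []
    · rw [if_neg (fun h => h hf), (omin_none_eq_none_iff _).mpr hf]
    · rw [if_pos hf, omin_nil_eq_min?]
  · rw [if_pos hs]
    have h := (omin_none_eq_none_iff (candidates.filter (fun v => decide (64 ≤ v ∧ v ≤ 1000000))))
    cases hm : omin none (candidates.filter (fun v => decide (64 ≤ v ∧ v ≤ 1000000))) with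
    | none => exact absurd (h.mp hm) hs
    | some m => rw [omin_nil_eq_min?] at hm; rw [hm]
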